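-- pv_equiv track=rewrite | github.com/Jyun-Neng/codejam-kickstart | 2018/roundB/NoNine/no-nine.py | solve
-- ===== SOURCE A (Python) =====
-- def solve(num):
--     X = num
--     x = [num % 10]
--     num //= 10
--     legal = 0
--     while num != 0:
--         x.append(num % 10)
--         num //= 10
--
--     for i, digit in enumerate(x):
--         if i >= 1 and digit != 9:
--             legal += digit * 8 * (9 ** (i - 1))
--
--     if 9 in x[1:]:
--         return legal
--
--     for n in range(X - x[0], X + 1):
--         if n % 9 != 0 and n % 10 != 9:
--             legal += 1
--     return legal
-- ===== SOURCE B (Python) =====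
-- def _weighted(t):
--     # weighted positional sum: each non-9 digit d of t at offset j contributes d * 8 * 9**j
--     if t <= 0:
--         return 0
--     d = t % 10
--     return (0 if d == 9 else 8 * d) + 9 * _weighted(t // 10)
--
--
-- def _has_nine(t):
--     while t > 0:
--         if t % 10 == 9:
--             return True
--         t //= 10
--     return False
--
--
-- def solve(num):
--     t, r = divmod(num, 10)
--     legal = _weighted(t)
--     if _has_nine(t):
--         return legal
--     for d in range(r + 1):
--         if d != 9 and (t + d) % 9 != 0:
--             legal += 1
--     return legal
-- ===== Notes on version B (the rewrite author's own statement) =====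
-- stated objective: alternative
-- what changed: B replaces A's explicit digit-list construction plus enumerate-indexed positional sum and membership test on a slice by a single arithmetic recursion on num//10 (a base-9-weighted fold that skips 9 digits) plus the same small tail scan.
-- outside the precondition, e.g. on solve(-1): A does not finish within the time limit, B returns 8
import Mathlib
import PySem

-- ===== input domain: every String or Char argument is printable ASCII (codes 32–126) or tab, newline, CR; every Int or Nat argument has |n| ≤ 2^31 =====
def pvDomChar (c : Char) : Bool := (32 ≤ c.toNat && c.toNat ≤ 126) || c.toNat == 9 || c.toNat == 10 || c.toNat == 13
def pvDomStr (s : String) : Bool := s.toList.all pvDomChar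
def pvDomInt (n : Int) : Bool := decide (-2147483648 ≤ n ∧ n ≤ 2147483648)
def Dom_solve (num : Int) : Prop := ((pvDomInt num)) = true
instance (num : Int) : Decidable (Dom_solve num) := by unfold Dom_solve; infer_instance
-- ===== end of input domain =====

-- B replaces A's digit-list building, enumerate-indexed positional sum and slice
-- membership test by a single arithmetic recursion on num // 10; objective: alternative.

-- ===== PORT A =====
-- the digit-collecting 'while num != 0' loop; Python never terminates for num < 0
-- (num //= 10 stalls at -1), so those inputs are outside Pre_solve; the Nat fuel
-- (num.toNat + 1 at the call site, enough for every num ≥ 0) is a totality guard only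
def solveDigitsGo : Nat → Int → List Int → List Int
  | 0, _, acc => acc
  | fuel+1, num, acc =>
      if num = 0 then acc
      else solveDigitsGo fuel (PySem.Int.floordiv num 10) (acc ++ [PySem.Int.mod num 10])

def solve (num : Int) : Int :=
  let X := num
  let x := solveDigitsGo (num.toNat + 1) (PySem.Int.floordiv num 10) [PySem.Int.mod num 10]
  let legal := (PySem.List.enumerate x 0).foldl
      (fun acc p => if 1 ≤ p.1 ∧ p.2 ≠ 9 then acc + p.2 * 8 * 9 ^ (p.1 - 1).toNat else acc) 0
  if 9 ∈ PySem.List.slice x (some 1) none then legal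
  else
    -- x is nonempty by construction, so x[0] is its head
    (PySem.List.pyRange (X - x.headI) (X + 1) 1).foldl
      (fun acc n => if PySem.Int.mod n 9 ≠ 0 ∧ PySem.Int.mod n 10 ≠ 9 then acc + 1 else acc) legal

-- ===== PORT B =====
-- B's recursive _weighted; the Nat fuel (t.toNat + 1 at the call site) is a totality guard only
def altWeightedGo : Nat → Int → Int
  | 0, _ => 0
  | fuel+1, t =>
      if t ≤ 0 then 0
      else (if PySem.Int.mod t 10 = 9 then 0 else 8 * PySem.Int.mod t 10) +
           9 * altWeightedGo fuel (PySem.Int.floordiv t 10)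

def altWeighted (t : Int) : Int := altWeightedGo (t.toNat + 1) t

-- B's 'while t > 0' loop of _has_nine; fuel is a totality guard only
def altHasNineGo : Nat → Int → Bool
  | 0, _ => false
  | fuel+1, t =>
      if t ≤ 0 then false
      else if PySem.Int.mod t 10 = 9 then true
      else altHasNineGo fuel (PySem.Int.floordiv t 10)

def altHasNine (t : Int) : Bool := altHasNineGo (t.toNat + 1) t

def solve_alt (num : Int) : Int :=
  let t := PySem.Int.floordiv num 10
  let r := PySem.Int.mod num 10
  let legal := altWeighted t
  if altHasNine t then legal
  else
    (PySem.List.pyRange 0 (r + 1) 1).foldl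
      (fun acc d => if d ≠ 9 ∧ PySem.Int.mod (t + d) 9 ≠ 0 then acc + 1 else acc) legal

-- ===== PRECONDITION & SPEC =====
-- Pre_ excludes num < 0, where Python A never returns (the 'while num != 0' loop
-- runs forever because (-1) // 10 == -1)
def Pre_solve (num : Int) : Prop := 0 ≤ num
instance (num : Int) : Decidable (Pre_solve num) := by unfold Pre_solve; infer_instance
def pvWitness_solve : Int := 42

def Spec_solve (num : Int) (out : Int) : Prop := out = solve_alt num
instance (num : Int) (out : Int) : Decidable (Spec_solve num out) := by unfold Spec_solve; infer_instance

-- ===== CLAIM =====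
def Claim_equal_solve : Prop := ∀ (num : Int), Dom_solve num → Pre_solve num → Spec_solve num (solve num)

-- ===== LEMMAS AND PROOFS =====

theorem fd10 (a : Int) : PySem.Int.floordiv a 10 = a / 10 :=
  PySem.Int.floordiv_eq_ediv_of_pos (by omega)
theorem md10 (a : Int) : PySem.Int.mod a 10 = a % 10 :=
  PySem.Int.mod_eq_emod_of_pos (by omega)
theorem md9 (a : Int) : PySem.Int.mod a 9 = a % 9 :=
  PySem.Int.mod_eq_emod_of_pos (by omega)

-- proof-side view of A's digit list
def digitsOf (n : Int) : List Int :=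
  if n ≤ 0 then [] else n % 10 :: digitsOf (n / 10)
termination_by n.toNat
decreasing_by omega

-- weighted value of a digit list: non-9 digit d at offset j contributes d * 8 * 9^j
def wval (ds : List Int) : Int := ds.foldr (fun d s => (if d = 9 then 0 else 8 * d) + 9 * s) 0

theorem digitsOf_nonpos (n : Int) (h : n ≤ 0) : digitsOf n = [] := by
  rw [digitsOf, if_pos h]

theorem digitsOf_pos (n : Int) (h : 0 < n) : digitsOf n = n % 10 :: digitsOf (n / 10) := by
  rw [digitsOf, if_neg (by omega)]

theorem solveDigitsGo_eq : ∀ (fuel : Nat) (n : Int) (acc : List Int), 0 ≤ n → n.toNat < fuel →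
    solveDigitsGo fuel n acc = acc ++ digitsOf n := by
  intro fuel
  induction fuel with
  | zero => intro n acc _ h; omega
  | succ fuel ih =>
      intro n acc hn _
      rw [solveDigitsGo]
      by_cases h0 : n = 0
      · rw [if_pos h0, h0, digitsOf_nonpos 0 (by omega)]; simp
      · rw [if_neg h0, fd10, md10,
            ih (n / 10) _ (by omega) (by omega),
            digitsOf_pos n (by omega)]
        simp

theorem altWeightedGo_eq : ∀ (fuel : Nat) (t : Int), t.toNat < fuel →
    altWeightedGo fuel t = wval (digitsOf t) := by
  intro fuel
  induction fuel with
  | zero => intro t h; omega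
  | succ fuel ih =>
      intro t _
      rw [altWeightedGo]
      by_cases h0 : t ≤ 0
      · rw [if_pos h0, digitsOf_nonpos t h0]; simp [wval]
      · rw [if_neg h0, fd10, md10, ih (t / 10) (by omega), digitsOf_pos t (by omega)]
        simp only [wval, List.foldr_cons]

theorem altWeighted_eq (t : Int) : altWeighted t = wval (digitsOf t) :=
  altWeightedGo_eq (t.toNat + 1) t (by omega)

theorem altHasNineGo_iff : ∀ (fuel : Nat) (t : Int), t.toNat < fuel →
    (altHasNineGo fuel t = true ↔ 9 ∈ digitsOf t) := by
  intro fuel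
  induction fuel with
  | zero => intro t h; omega
  | succ fuel ih =>
      intro t _
      rw [altHasNineGo]
      by_cases h0 : t ≤ 0
      · rw [if_pos h0, digitsOf_nonpos t h0]; simp
      · rw [if_neg h0, md10, fd10, digitsOf_pos t (by omega)]
        by_cases h9 : t % 10 = 9
        · rw [if_pos h9]; simp [h9]
        · rw [if_neg h9, ih (t / 10) (by omega)]
          simp only [List.mem_cons]
          constructor
          · exact fun h => Or.inr h
          · rintro (hc | hc)
            · exact absurd hc.symm h9
            · exact hc

theorem altHasNine_iff (t : Int) : altHasNine t = true ↔ 9 ∈ digitsOf t :=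
  altHasNineGo_iff (t.toNat + 1) t (by omega)

theorem enum_fold (ds : List Int) : ∀ (s : Int) (acc : Int), 1 ≤ s →
    (PySem.List.enumerate ds s).foldl
      (fun acc p => if 1 ≤ p.1 ∧ p.2 ≠ 9 then acc + p.2 * 8 * 9 ^ (p.1 - 1).toNat else acc) acc
    = acc + 9 ^ (s - 1).toNat * wval ds := by
  induction ds with
  | nil => intro s acc _; simp [PySem.List.enumerate_nil, wval]
  | cons d ds ih =>
      intro s acc hs
      rw [PySem.List.enumerate_cons]
      simp only [List.foldl_cons]
      have hpow : (s + 1 - 1).toNat = (s - 1).toNat + 1 := by omega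
      by_cases hd : d = 9
      · rw [if_neg (by simp [hd]), ih (s + 1) acc (by omega), hpow, pow_succ]
        simp only [wval, List.foldr_cons, if_pos hd]
        ring
      · rw [if_pos ⟨hs, hd⟩, ih (s + 1) _ (by omega), hpow, pow_succ]
        simp only [wval, List.foldr_cons, if_neg hd]
        ring

theorem tail_fold (t : Int) (_ht : 0 ≤ t) : ∀ (k : Nat), k ≤ 10 → ∀ (acc : Int),
    (PySem.List.pyRange (10*t) (10*t + (k:Int)) 1).foldl
      (fun acc n => if PySem.Int.mod n 9 ≠ 0 ∧ PySem.Int.mod n 10 ≠ 9 then acc + 1 else acc) acc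
  = (PySem.List.pyRange 0 (k:Int) 1).foldl
      (fun acc d => if d ≠ 9 ∧ PySem.Int.mod (t + d) 9 ≠ 0 then acc + 1 else acc) acc := by
  intro k
  induction k with
  | zero => intro _ acc; simp [PySem.List.pyRange_one_eq_nil]
  | succ k ih =>
      intro hk acc
      have h1 : ((k+1 : Nat) : Int) = (k:Int) + 1 := by push_cast; ring
      rw [h1, ← add_assoc,
          PySem.List.pyRange_one_succ_right (by omega : (10*t:Int) ≤ 10*t + k),
          PySem.List.pyRange_one_succ_right (by omega : (0:Int) ≤ (k:Int)),
          List.foldl_append, List.foldl_append, ih (by omega)]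
      simp only [List.foldl_cons, List.foldl_nil, md9, md10]
      have hc : ((10*t + (k:Int)) % 9 ≠ 0 ∧ (10*t + (k:Int)) % 10 ≠ 9) ↔ ((k:Int) ≠ 9 ∧ (t + (k:Int)) % 9 ≠ 0) := by
        have hkb : (k:Int) ≤ 9 := by exact_mod_cast (by omega : k ≤ 9)
        have hk0 : (0:Int) ≤ (k:Int) := by positivity
        omega
      rw [if_congr hc rfl rfl]

-- ===== VERDICT =====
theorem solve_spec : Claim_equal_solve := by
  intro num _hdom hpre
  unfold Spec_solve
  have hnum : num = (num.toNat : Int) := (Int.toNat_of_nonneg hpre).symm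
  have ht : PySem.Int.floordiv num 10 = ((num.toNat / 10 : Nat) : Int) := by
    rw [fd10, hnum]; push_cast; omega
  have hr : PySem.Int.mod num 10 = ((num.toNat % 10 : Nat) : Int) := by
    rw [md10, hnum]; push_cast; omega
  unfold solve solve_alt
  simp only [ht, hr]
  rw [solveDigitsGo_eq (num.toNat + 1) _ _ (by positivity) (by omega)]
  rw [List.singleton_append, PySem.List.slice_from_one, List.tail_cons,
      PySem.List.enumerate_cons]
  simp only [List.foldl_cons, List.headI_cons]
  rw [if_neg (by norm_num : ¬((1:Int) ≤ 0 ∧ ((num.toNat % 10 : Nat):Int) ≠ 9))]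
  rw [show (0:Int) + 1 = 1 from by norm_num]
  rw [enum_fold _ 1 0 (by norm_num)]
  rw [altWeighted_eq]
  by_cases hmem : 9 ∈ digitsOf ((num.toNat / 10 : Nat) : Int)
  · rw [if_pos hmem, if_pos ((altHasNine_iff _).mpr hmem)]
    norm_num
  · rw [if_neg hmem, if_neg (by simpa using (fun h => hmem ((altHasNine_iff _).mp h)))]
    have h10t : num - ((num.toNat % 10 : Nat):Int) = 10 * ((num.toNat / 10 : Nat):Int) := by omega
    have hend : num + 1 = 10 * ((num.toNat / 10 : Nat):Int) + ((num.toNat % 10 + 1 : Nat) : Int) := by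
      push_cast; omega
    rw [h10t, hend, tail_fold _ (by positivity) (num.toNat % 10 + 1) (by omega)]
    norm_num
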